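-- pv_equiv track=rewrite | github.com/soundreaper/Riot-API-Testing | APIGrabber.py | currentlyMastering
-- ===== SOURCE A (Python) =====
-- def currentlyMastering(List):
--     counter = 0
--     num = List[0]
--     for i in List:
--         curr_freq = List.count(i)
--         if(curr_freq > counter):
--             counter = curr_freq
--             num = i
--     return num
-- ===== SOURCE B (Python) =====
-- def currentlyMastering(List):
--     freq = {}
--     for x in List:
--         freq[x] = freq.get(x, 0) + 1
--     return max(freq, key=freq.get)
-- ===== Notes on version B (the rewrite author's own statement) =====
-- stated objective: faster
-- what changed: Replaces the quadratic rescan (List.count inside the loop) by a single-pass frequency dictionary followed by max over its keys; dict insertion order plus max's keep-first rule reproduces A's tie-break (first element reaching the maximal count).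
import Mathlib
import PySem

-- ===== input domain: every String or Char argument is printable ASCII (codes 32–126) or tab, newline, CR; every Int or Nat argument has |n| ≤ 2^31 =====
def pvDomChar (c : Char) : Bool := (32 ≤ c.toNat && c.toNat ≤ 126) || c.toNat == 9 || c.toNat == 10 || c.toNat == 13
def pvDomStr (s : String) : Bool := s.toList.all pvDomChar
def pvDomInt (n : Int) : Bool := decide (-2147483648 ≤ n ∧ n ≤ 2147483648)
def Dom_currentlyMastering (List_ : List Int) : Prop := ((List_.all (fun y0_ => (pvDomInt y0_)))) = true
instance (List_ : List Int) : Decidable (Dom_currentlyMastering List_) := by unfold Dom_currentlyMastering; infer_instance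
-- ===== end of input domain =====

-- B replaces A's quadratic rescan (List.count inside the loop) by a one-pass frequency
-- dictionary followed by max over its keys (objective: faster, in a timing run).

-- ===== PORT A =====
def currentlyMastering (List_ : List Int) : Int :=
  -- num = List[0]: IndexError on the empty list; Pre_ excludes it
  let num0 : Int := (PySem.List.pyGet? List_ 0).getD 0
  let r := List_.foldl (fun (s : Int × Int) i =>
      let curr_freq : Int := (PySem.List.count List_ i : Int)
      if curr_freq > s.1 then (curr_freq, i) else s)
    (0, num0)
  r.2

-- ===== PORT B =====
def currentlyMastering_alt (List_ : List Int) : Int :=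
  let freq : PySem.Dict Int Int :=
    List_.foldl (fun d x => d.insert x (d.getD x 0 + 1)) PySem.Dict.empty
  -- max(freq, key=freq.get): ValueError on the empty dict; Pre_ excludes the empty list
  (PySem.List.max? freq.keys (fun k => freq.getD k 0)).getD 0

-- ===== PRECONDITION & SPEC =====
-- Pre_ excludes exactly the empty list, on which A raises IndexError (List[0]).
def Pre_currentlyMastering (List_ : List Int) : Prop := List_ ≠ []
instance (List_ : List Int) : Decidable (Pre_currentlyMastering List_) := by
  unfold Pre_currentlyMastering; infer_instance
def pvWitness_currentlyMastering : List Int := [1, 2, 2]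

def Spec_currentlyMastering (List_ : List Int) (out : Int) : Prop := out = currentlyMastering_alt List_
instance (List_ : List Int) (out : Int) : Decidable (Spec_currentlyMastering List_ out) := by
  unfold Spec_currentlyMastering; infer_instance

-- ===== CLAIM (what is proved, stated in full; the proofs are below) =====
def Claim_equal_currentlyMastering : Prop := ∀ (List_ : List Int), Dom_currentlyMastering List_ → Pre_currentlyMastering List_ → Spec_currentlyMastering List_ (currentlyMastering List_)

-- ===== LEMMAS AND PROOFS =====

-- ordered first-occurrence dedup of the second list, skipping elements already in `ac`
def pvDce (ac : List Int) : List Int → List Int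
  | [] => []
  | x :: xs => if x ∈ ac then pvDce ac xs else x :: pvDce (ac ++ [x]) xs

-- folding Set.add from accumulator `ac` appends exactly the new first occurrences
lemma pv_foldl_add : ∀ (xs ac : List Int),
    xs.foldl PySem.Set.add ac = ac ++ pvDce ac xs := by
  intro xs
  induction xs with
  | nil => intro ac; simp [pvDce]
  | cons x xs ih =>
    intro ac
    by_cases h : x ∈ ac
    · simp [pvDce, h, List.foldl_cons, ih]
      
    · simp only [List.foldl_cons, PySem.Set.add_of_not_mem h, pvDce, if_neg h, ih (ac ++ [x])]
      simp

-- duplicate occurrences never fire A's update: the fold over xs equals the fold over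
-- its first occurrences, given the running max already dominates everything in `ac`
lemma pv_foldl_dce (c : Int → Int) : ∀ (xs : List Int) (s : Int × Int) (ac : List Int),
    (∀ i ∈ ac, c i ≤ s.1) →
    xs.foldl (fun s i => if c i > s.1 then (c i, i) else s) s
      = (pvDce ac xs).foldl (fun s i => if c i > s.1 then (c i, i) else s) s := by
  intro xs
  induction xs with
  | nil => intro s ac _; simp [pvDce]
  | cons x xs ih =>
    intro s ac hac
    by_cases h : x ∈ ac
    · have hx : ¬ c x > s.1 := not_lt.mpr (hac x h)
      simp only [pvDce, if_pos h, List.foldl_cons, if_neg hx]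
      exact ih s ac hac
    · simp only [pvDce, if_neg h, List.foldl_cons]
      apply ih
      intro i hi
      have h1 : s.1 ≤ (if c x > s.1 then ((c x : Int), x) else s).1 := by
        split_ifs with hx
        · exact le_of_lt hx
        · exact le_refl _
      have h2 : c x ≤ (if c x > s.1 then ((c x : Int), x) else s).1 := by
        split_ifs with hx
        · exact le_refl _
        · exact not_lt.1 hx
      rcases List.mem_append.1 hi with hi | hi
      · exact le_trans (hac i hi) h1
      · rw [List.mem_singleton.1 hi]
        exact h2

-- Python max with a key over a nonempty list is the plain keep-first running-max fold
lemma pv_max?_cons (c : Int → Int) : ∀ (t : List Int) (m : Int),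
    PySem.List.max? (m :: t) c
      = some (t.foldl (fun b x => if c b < c x then x else b) m) := by
  intro t
  induction t with
  | nil => intro m; rfl
  | cons x t ih =>
    intro m
    have e1 : PySem.List.max? (m :: x :: t) c
        = PySem.List.max? ((if c m < c x then x else m) :: t) c := by
      by_cases h : c m < c x <;> simp [PySem.List.max?, List.foldl_cons, h]
    rw [e1, ih]
    by_cases h : c m < c x <;> simp [List.foldl_cons, h]

-- once A's state is (c m, m), its fold tracks exactly the keep-first max fold
lemma pv_foldl_snd (c : Int → Int) : ∀ (t : List Int) (m : Int),
    t.foldl (fun (s : Int × Int) i => if c i > s.1 then (c i, i) else s) (c m, m)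
      = (c (t.foldl (fun m x => if c m < c x then x else m) m),
         t.foldl (fun m x => if c m < c x then x else m) m) := by
  intro t
  induction t with
  | nil => intro m; rfl
  | cons x t ih =>
    intro m
    by_cases h : c m < c x
    · simpa [List.foldl_cons, h] using ih x
    · simpa [List.foldl_cons, h] using ih m

-- pvDce of a nonempty list is nonempty
lemma pv_dce_ne_nil (L : List Int) (h : L ≠ []) : pvDce [] L ≠ [] := by
  cases L with
  | nil => exact absurd rfl h
  | cons x xs => simp [pvDce]

-- ===== VERDICT (by name: the statement is the Claim_ definition above) =====
theorem currentlyMastering_spec : Claim_equal_currentlyMastering := by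
  intro L _ hpre
  unfold Spec_currentlyMastering
  set c : Int → Int := fun v => ((List.count v L : Nat) : Int) with hc
  -- name the first occurrences m :: t
  obtain ⟨m, t, hD⟩ : ∃ m t, pvDce [] L = m :: t := by
    cases hdce : pvDce [] L with
    | nil => exact absurd hdce (pv_dce_ne_nil L hpre)
    | cons m t => exact ⟨m, t, rfl⟩
  have hofl : PySem.Set.ofList L = m :: t := by
    rw [PySem.Set.ofList_eq_foldl, pv_foldl_add, hD]; rfl
  have hm : m ∈ L := (PySem.Set.mem_ofList L m).1 (by rw [hofl]; exact List.mem_cons_self)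
  have hcm : 0 < c m := by
    have := List.count_pos_iff.2 hm
    simp only [hc]; exact_mod_cast this
  -- A's side
  have hA : currentlyMastering L
      = t.foldl (fun m x => if c m < c x then x else m) m := by
    unfold currentlyMastering
    simp only [PySem.List.count_eq]
    rw [pv_foldl_dce c L ((0 : Int), (PySem.List.pyGet? L 0).getD 0) [] (by simp), hD,
      List.foldl_cons]
    have hstep : (if c m > (0 : Int) then (c m, m)
        else ((0 : Int), (PySem.List.pyGet? L 0).getD 0)) = (c m, m) := if_pos hcm
    simp only [hc] at hstep ⊢
    rw [hstep, pv_foldl_snd]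
  -- B's side
  have hB : currentlyMastering_alt L
      = t.foldl (fun m x => if c m < c x then x else m) m := by
    unfold currentlyMastering_alt
    rw [PySem.Dict.foldl_insert_getD_add_one_eq_counter]
    show (PySem.List.max? (PySem.Dict.counter L).keys
        (fun k => (PySem.Dict.counter L).getD k 0)).getD 0 = _
    rw [PySem.Dict.keys_counter]
    have hkey : (fun k => (PySem.Dict.counter L).getD k 0) = c := by
      funext k; simp [PySem.Dict.getD_counter, hc]
    rw [hkey, hofl]
    rw [pv_max?_cons c t m]
    rfl
  rw [hA, hB]
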